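-- pv_equiv track=rewrite | github.com/yamchips/MIT-6.006 | Problem_Set_2/problem_session2.py | calspecial
-- ===== SOURCE A (Python) =====
-- def calspecial(D):
--     '''
--     Input: D is a list that only one element is not special, which
--           means D consists of two sorted arrays
--     Output: A list 'result'. Each element indicates the damage of the wolf
--     '''
--     result = [1]*len(D)
--     for i in range(len(D)-1):
--         if D[i] > D[i+1]:
--             specialnum = i
--     i, j = 0, specialnum + 1
--     while i <= specialnum and j < len(D):
--         if D[i] > D[j]:
--             result[i] += 1
--             j += 1
--         else:
--             i += 1
--     result1 = result[:]
--     for i in range(1,specialnum+1):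
--         result[i] = result1[i] + sum(result1[:i]) - i
--     return result
-- ===== SOURCE B (Python) =====
-- def calspecial(D):
--     n = len(D)
--     # last index with a descent (Python A's overwrite loop keeps the last one)
--     special = next(i for i in reversed(range(n - 1)) if D[i] > D[i + 1])
--     out = []
--     j = special + 1
--     prefix = 0
--     for i in range(special + 1):
--         c = 1
--         while j < n and D[i] > D[j]:
--             c += 1
--             j += 1
--         out.append(c + prefix - i)
--         prefix += c
--     out.extend([1] * (n - special - 1))
--     return out
-- ===== Notes on version B (the rewrite author's own statement) =====
-- stated objective: faster
-- what changed: B fuses the two-pointer merge and the final adjustment into one left-to-right pass that maintains a running prefix sum of the counts, instead of A's separate mutation loop followed by re-summing result1[:i] for every i (and it finds the split point by a reverse scan with early exit instead of scanning all gaps).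
import Mathlib
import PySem

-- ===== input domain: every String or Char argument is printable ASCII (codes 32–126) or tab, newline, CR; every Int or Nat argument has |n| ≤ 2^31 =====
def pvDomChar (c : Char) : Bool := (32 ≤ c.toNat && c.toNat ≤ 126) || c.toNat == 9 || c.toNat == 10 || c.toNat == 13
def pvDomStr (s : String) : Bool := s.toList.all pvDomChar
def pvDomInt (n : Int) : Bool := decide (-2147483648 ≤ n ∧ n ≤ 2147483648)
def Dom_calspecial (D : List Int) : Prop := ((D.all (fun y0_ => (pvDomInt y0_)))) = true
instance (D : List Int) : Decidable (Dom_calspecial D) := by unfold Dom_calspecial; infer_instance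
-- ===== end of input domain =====

-- B replaces A's quadratic re-summation sum(result1[:i]) by a single fused pass with a
-- running prefix sum (and a reverse early-exit scan for the split point): O(n) instead of O(n^2).

-- ===== PORT A =====
-- 'for i in range(len(D)-1): if D[i] > D[i+1]: specialnum = i'  (none = specialnum never assigned → NameError)
def calA_find (D : List Int) : Option Nat :=
  (List.range (D.length - 1)).foldl
    (fun acc i => if D.getD i 0 > D.getD (i+1) 0 then some i else acc) none

-- the 'while i <= specialnum and j < len(D)' two-pointer loop mutating result
def calA_merge (D : List Int) (s : Nat) (i j : Nat) (result : List Int) : List Int :=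
  if h : i ≤ s ∧ j < D.length then
    if D.getD i 0 > D.getD j 0 then
      calA_merge D s i (j+1) (result.set i (result.getD i 0 + 1))
    else
      calA_merge D s (i+1) j result
  else result
termination_by (s + 1 - i) + (D.length - j)
decreasing_by all_goals omega

def calspecial (D : List Int) : List Int :=
  match calA_find D with
  | none => []   -- Python raises NameError here (no descent); such inputs are excluded by Pre_
  | some s =>
    let result := calA_merge D s 0 (s+1) (List.replicate D.length 1)
    -- 'for i in range(1, specialnum+1): result[i] = result1[i] + sum(result1[:i]) - i'
    (List.range' 1 s).foldl
      (fun r i => r.set i (result.getD i 0 + (result.take i).sum - (i : Int))) result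

-- ===== PORT B =====
-- 'next(i for i in reversed(range(n-1)) if D[i] > D[i+1])'
def calB_find (D : List Int) : Option Nat :=
  (List.range (D.length - 1)).reverse.find? (fun i => decide (D.getD i 0 > D.getD (i+1) 0))

-- inner 'while j < n and D[i] > D[j]: j += 1' (returns the final j)
def calB_adv (D : List Int) (x : Int) (j : Nat) : Nat :=
  if h : j < D.length ∧ x > D.getD j 0 then calB_adv D x (j+1) else j
termination_by D.length - j
decreasing_by omega

-- 'for i in range(special+1): … out.append(c + prefix - i); prefix += c'
def calB_loop (D : List Int) (s i j : Nat) (pfx : Int) : List Int :=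
  if i ≤ s then
    let j' := calB_adv D (D.getD i 0) j
    let c : Int := 1 + ((j' - j : Nat) : Int)
    (c + pfx - (i : Int)) :: calB_loop D s (i+1) j' (pfx + c)
  else []
termination_by s + 1 - i
decreasing_by omega

def calspecial_alt (D : List Int) : List Int :=
  match calB_find D with
  | none => []
  | some s => calB_loop D s 0 (s+1) 0 ++ List.replicate (D.length - (s+1)) 1

-- ===== PRECONDITION & SPEC =====
-- Pre_ excludes exactly the inputs with no descent D[i] > D[i+1] (e.g. empty or sorted lists),
-- on which Python A raises NameError ('specialnum' is never assigned).
def Pre_calspecial (D : List Int) : Prop :=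
  ∃ i ∈ List.range (D.length - 1), D.getD i 0 > D.getD (i+1) 0
instance (D : List Int) : Decidable (Pre_calspecial D) := by unfold Pre_calspecial; infer_instance

def pvWitness_calspecial : List Int := [2, 1]

def Spec_calspecial (D : List Int) (out : List Int) : Prop := out = calspecial_alt D
instance (D : List Int) (out : List Int) : Decidable (Spec_calspecial D out) := by unfold Spec_calspecial; infer_instance

-- ===== CLAIM (what is proved, stated in full; the proofs are below) =====
def Claim_equal_calspecial : Prop := ∀ (D : List Int), Dom_calspecial D → Pre_calspecial D → Spec_calspecial D (calspecial D)

-- ===== LEMMAS AND PROOFS =====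

-- the counts list: entry i (for i = i0..s) is 1 + (#j's consumed while the pointer sits at i)
def cnts (D : List Int) (s : Nat) (i j : Nat) : List Int :=
  if i ≤ s then
    (1 + ((calB_adv D (D.getD i 0) j - j : Nat) : Int)) :: cnts D s (i+1) (calB_adv D (D.getD i 0) j)
  else []
termination_by s + 1 - i
decreasing_by omega

-- prefix-sum transform (pure form of B's output loop body)
def transf (p : Int) (i : Nat) : List Int → List Int
  | [] => []
  | c :: rest => (c + p - (i : Int)) :: transf (p + c) (i + 1) rest

lemma find_eq (D : List Int) :
    ∀ (l : List Nat) (acc : Option Nat),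
      l.foldl (fun a i => if D.getD i 0 > D.getD (i+1) 0 then some i else a) acc
        = (l.reverse.find? (fun i => decide (D.getD i 0 > D.getD (i+1) 0))).or acc := by
  intro l
  induction l with
  | nil => simp
  | cons a l ih =>
    intro acc
    simp only [List.foldl_cons, List.reverse_cons, List.find?_append, ih]
    by_cases h : D.getD a 0 > D.getD (a+1) 0 <;>
      simp only [List.find?_cons, h, decide_true, decide_false, if_pos, if_neg,
        Option.or_assoc, Option.or_some, not_false_iff] <;> simp

lemma calA_find_eq (D : List Int) : calA_find D = calB_find D := by
  have := find_eq D (List.range (D.length - 1)) none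
  simpa [calA_find, calB_find] using this

lemma calB_adv_ge (D : List Int) (x : Int) (j : Nat) : j ≤ calB_adv D x j := by
  unfold calB_adv
  split
  · have := calB_adv_ge D x (j+1)
    omega
  · exact le_refl j
termination_by D.length - j
decreasing_by omega

lemma set_getD_self (l : List Int) (i : Nat) (h : i < l.length) : l.set i (l.getD i 0) = l := by
  apply List.ext_getElem
  · simp
  · intro n h1 h2
    rw [List.getElem_set]
    split
    · subst ‹i = n›; rw [List.getD_eq_getElem l 0 h]
    · rfl

lemma stepA (D : List Int) (s i : Nat) (hi : i ≤ s) :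
    ∀ (j : Nat) (res : List Int), i < res.length →
      calA_merge D s i j res
        = calA_merge D s (i+1) (calB_adv D (D.getD i 0) j)
            (res.set i (res.getD i 0 + ((calB_adv D (D.getD i 0) j - j : Nat) : Int))) := by
  intro j res hlen
  by_cases h : j < D.length ∧ D.getD i 0 > D.getD j 0
  · have hadv : calB_adv D (D.getD i 0) j = calB_adv D (D.getD i 0) (j+1) := by
      conv_lhs => rw [calB_adv]
      rw [dif_pos h]
    have hge : j + 1 ≤ calB_adv D (D.getD i 0) (j+1) := calB_adv_ge D _ _
    conv_lhs => rw [calA_merge]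
    rw [dif_pos ⟨hi, h.1⟩, if_pos h.2]
    rw [stepA D s i hi (j+1) (res.set i (res.getD i 0 + 1)) (by simpa using hlen)]
    rw [hadv]
    congr 1
    rw [List.set_set]
    congr 1
    have : (res.set i (res.getD i 0 + 1)).getD i 0 = res.getD i 0 + 1 := by
      simp [List.getD, List.getElem?_set_self, hlen]
    rw [this]
    omega
  · have hadv : calB_adv D (D.getD i 0) j = j := by
      rw [calB_adv, dif_neg h]
    rw [hadv]
    simp only [Nat.sub_self, Nat.cast_zero, add_zero, set_getD_self res i hlen]
    by_cases hj : j < D.length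
    · have hle : ¬ (D.getD i 0 > D.getD j 0) := by tauto
      conv_lhs => rw [calA_merge]
      rw [dif_pos ⟨hi, hj⟩, if_neg hle]
    · conv_lhs => rw [calA_merge]
      rw [dif_neg (by tauto)]
      conv_rhs => rw [calA_merge]
      rw [dif_neg (by omega)]
termination_by j res _ => D.length - j
decreasing_by omega

lemma mergeA (D : List Int) (s : Nat) (hs : s + 1 < D.length) :
    ∀ (k i : Nat) (acc : List Int) (j : Nat), s + 1 - i ≤ k → acc.length = i → i ≤ s + 1 →
      calA_merge D s i j (acc ++ List.replicate (D.length - i) 1)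
        = acc ++ cnts D s i j ++ List.replicate (D.length - (s+1)) 1 := by
  intro k
  induction k with
  | zero =>
    intro i acc j hk hlen hle
    have hieq : i = s + 1 := by omega
    subst hieq
    rw [calA_merge, dif_neg (by omega), cnts, if_neg (by omega)]
    simp
  | succ k ih =>
    intro i acc j hk hlen hle
    by_cases hi : i ≤ s
    · have hlt : i < D.length := by omega
      have hres : (acc ++ List.replicate (D.length - i) (1:Int)).length = D.length := by
        simp [hlen]; omega
      rw [stepA D s i hi j _ (by omega)]
      have hrep : D.length - i = (D.length - (i+1)) + 1 := by omega
      have hgd : (acc ++ List.replicate (D.length - i) (1:Int)).getD i 0 = 1 := by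
        simp only [List.getD, List.getElem?_append_right (by omega : acc.length ≤ i), hlen,
          Nat.sub_self, List.getElem?_replicate]
        rw [if_pos (by omega)]
        rfl
      rw [hgd]
      set j' := calB_adv D (D.getD i 0) j with hj'
      set c : Int := 1 + ((j' - j : Nat) : Int) with hc
      have hset : (acc ++ List.replicate (D.length - i) (1:Int)).set i c
          = (acc ++ [c]) ++ List.replicate (D.length - (i+1)) 1 := by
        rw [hrep, List.replicate_succ]
        rw [List.set_append_right _ _ (by omega)]
        simp [hlen]
      rw [hset]
      rw [ih (i+1) (acc ++ [c]) j' (by omega) (by simp [hlen]) (by omega)]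
      conv_rhs => rw [cnts]
      rw [if_pos hi, ← hj', ← hc]
      simp [List.append_assoc]
    · have hieq : i = s + 1 := by omega
      subst hieq
      rw [calA_merge, dif_neg (by omega), cnts, if_neg (by omega)]
      simp

lemma cnts_length (D : List Int) (s : Nat) :
    ∀ (i j : Nat), (cnts D s i j).length = s + 1 - i := by
  intro i j
  unfold cnts
  split
  · have := cnts_length D s (i+1) (calB_adv D (D.getD i 0) j)
    simp only [List.length_cons, this]
    omega
  · simp; omega
termination_by i j => s + 1 - i
decreasing_by omega

lemma loopB_eq_transf (D : List Int) (s : Nat) :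
    ∀ (i j : Nat) (p : Int), calB_loop D s i j p = transf p i (cnts D s i j) := by
  intro i j p
  unfold calB_loop cnts
  split
  · have := loopB_eq_transf D s (i+1) (calB_adv D (D.getD i 0) j) (p + (1 + ((calB_adv D (D.getD i 0) j - j : Nat) : Int)))
    simp only [transf, this]
  · simp [transf]
termination_by i j p => s + 1 - i
decreasing_by omega

lemma transf_length (p : Int) (i : Nat) (cs : List Int) : (transf p i cs).length = cs.length := by
  induction cs generalizing p i with
  | nil => simp [transf]
  | cons c rest ih => simp [transf, ih]

lemma transf_getElem? (cs : List Int) :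
    ∀ (p : Int) (i k : Nat),
      (transf p i cs)[k]?
        = (cs[k]?).map (fun c => c + (p + (cs.take k).sum) - ((i + k : Nat) : Int)) := by
  induction cs with
  | nil => simp [transf]
  | cons c rest ih =>
    intro p i k
    cases k with
    | zero => simp [transf]
    | succ k =>
      simp only [transf, List.getElem?_cons_succ, ih (p + c) (i+1) k, List.take_succ_cons,
        List.sum_cons]
      cases h : rest[k]? <;> simp [h] <;> push_cast <;> ring

lemma foldl_set_length (g : Nat → Int) :
    ∀ (l : List Nat) (r : List Int),
      (l.foldl (fun r i => r.set i (g i)) r).length = r.length := by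
  intro l
  induction l with
  | nil => simp
  | cons a l ih => intro r; simp [ih, List.length_set]

lemma foldl_set_getElem? (g : Nat → Int) :
    ∀ (m : Nat) (r : List Int) (k : Nat),
      ((List.range' 1 m).foldl (fun r i => r.set i (g i)) r)[k]?
        = if 1 ≤ k ∧ k < 1 + m ∧ k < r.length then some (g k) else r[k]? := by
  intro m
  induction m with
  | zero => intro r k; simp [List.range']; omega
  | succ m ih =>
    intro r k
    rw [List.range'_1_concat, List.foldl_append]
    simp only [List.foldl_cons, List.foldl_nil]
    rw [List.getElem?_set]
    rw [foldl_set_length, ih]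
    by_cases h1 : 1 + m = k <;> by_cases h2 : 1 ≤ k ∧ k < 1 + m ∧ k < r.length <;>
      by_cases h3 : 1 ≤ k ∧ k < 1 + (m+1) ∧ k < r.length <;>
      first
      | (simp [h1, h2, h3]; omega)
      | (simp [h1, h2, h3, List.getElem?_eq_none]; omega)
      | (simp [h1, h2, h3]; rw [if_neg (by omega)]; exact (List.getElem?_eq_none (by omega)).symm)
      | simp [h1, h2, h3]

-- ===== VERDICT (by name: the statement is the Claim_ definition above) =====
theorem calspecial_spec : Claim_equal_calspecial := by
  intro D _ hpre
  unfold Spec_calspecial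
  have hsome : ((List.range (D.length - 1)).reverse.find?
      (fun i => decide (D.getD i 0 > D.getD (i+1) 0))).isSome := by
    rw [List.find?_isSome]
    obtain ⟨i, hi, hgt⟩ := hpre
    exact ⟨i, by simpa using hi, by simpa using hgt⟩
  obtain ⟨s, hs⟩ := Option.isSome_iff_exists.mp hsome
  have hsB : calB_find D = some s := hs
  have hsA : calA_find D = some s := by rw [calA_find_eq]; exact hsB
  have hmem : s ∈ (List.range (D.length - 1)).reverse := List.mem_of_find?_eq_some hs
  have hslt : s + 1 < D.length := by
    rw [List.mem_reverse, List.mem_range] at hmem; omega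
  set cs := cnts D s 0 (s+1) with hcs
  set t := List.replicate (D.length - (s+1)) (1:Int) with ht
  have hcsl : cs.length = s + 1 := by rw [hcs, cnts_length]; omega
  have htl : t.length = D.length - (s+1) := by rw [ht, List.length_replicate]
  have hRlen : (cs ++ t).length = D.length := by
    rw [List.length_append, hcsl, htl]; omega
  have hres : calA_merge D s 0 (s+1) (List.replicate D.length 1) = cs ++ t := by
    have := mergeA D s hslt (s+1) 0 [] (s+1) (by omega) rfl (by omega)
    simpa [← hcs, ← ht] using this
  have eqA : calspecial D
      = (List.range' 1 s).foldl
          (fun r i => r.set i ((cs ++ t).getD i 0 + ((cs ++ t).take i).sum - (i : Int)))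
          (cs ++ t) := by
    unfold calspecial
    rw [hsA]
    simp only [← hres]
  have eqB : calspecial_alt D = transf 0 0 cs ++ t := by
    unfold calspecial_alt
    rw [hsB]
    simp only [loopB_eq_transf, ← hcs, ← ht]
  rw [eqA, eqB]
  have htf : (transf 0 0 cs).length = s + 1 := by rw [transf_length, hcsl]
  apply List.ext_getElem?
  intro k
  rw [foldl_set_getElem? _ s (cs ++ t) k]
  by_cases hk0 : k = 0
  · subst hk0
    rw [if_neg (by omega)]
    rw [List.getElem?_append_left (by omega), List.getElem?_append_left (by omega)]
    rw [transf_getElem?]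
    rw [List.getElem?_eq_getElem (by omega : 0 < cs.length)]
    simp
  · by_cases hks : k ≤ s
    · rw [if_pos ⟨by omega, by omega, by omega⟩]
      rw [List.getElem?_append_left (by omega : k < (transf 0 0 cs).length)]
      rw [transf_getElem?]
      have hRk : (cs ++ t).getD k 0 = cs[k] := by
        simp [List.getD, List.getElem?_append_left (show k < cs.length by omega),
          List.getElem?_eq_getElem (show k < cs.length by omega)]
      have hRt : (cs ++ t).take k = cs.take k :=
        List.take_append_of_le_length (by omega)
      rw [hRk, hRt, List.getElem?_eq_getElem (by omega : k < cs.length)]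
      simp
    · rw [if_neg (by omega)]
      rw [List.getElem?_append_right (by omega : cs.length ≤ k),
        List.getElem?_append_right (by omega : (transf 0 0 cs).length ≤ k)]
      rw [transf_length, hcsl]
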